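-- pv_equiv track=rewrite | github.com/cloveq6/cs61A | project/hog/hog_draft.py | swine_align
-- ===== SOURCE A (Python) =====
-- def swine_align(player_score, opponent_score):
--     """Return whether the player gets an extra turn due to Swine Align.
--
--     player_score:   The total score of the current player.
--     opponent_score: The total score of the other player.
--
--     >>> swine_align(30, 45)  # The GCD is 15.
--     True
--     >>> swine_align(35, 45)  # The GCD is 5.
--     False
--     """
--     # BEGIN PROBLEM 4a
--     "*** YOUR CODE HERE ***"
--     def gcd_inner(a, b):
--         if a<b: #如果a<b，则交换两数位置，否则不交换
--             a,b = b,a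
--         r = a % b #求a/b的余数
--         while r != 0: #在余数不为零时，始终进行交换和相除
--             a,b = b,r
--             r = a % b
--         return b #余数为零后，打印输出b
--     if player_score <=0 or opponent_score <=0 : return False
--     gcd = gcd_inner(player_score, opponent_score)
--     return gcd >= 10
-- ===== SOURCE B (Python) =====
-- def swine_align(player_score, opponent_score):
--     """Return whether the player gets an extra turn due to Swine Align."""
--     def gcd_inner(a, b):
--         if b == 0:
--             return a
--         return gcd_inner(b, a % b)
--     if player_score <= 0 or opponent_score <= 0:
--         return False
--     return gcd_inner(player_score, opponent_score) >= 10
-- ===== Notes on version B (the rewrite author's own statement) =====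
-- stated objective: simpler
-- what changed: Replaced the iterative gcd (explicit swap + while-loop on the remainder) with a plain recursive Euclidean helper gcd_inner(a,b) = a if b == 0 else gcd_inner(b, a % b); the guard and the >= 10 check are unchanged.
import Mathlib
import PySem

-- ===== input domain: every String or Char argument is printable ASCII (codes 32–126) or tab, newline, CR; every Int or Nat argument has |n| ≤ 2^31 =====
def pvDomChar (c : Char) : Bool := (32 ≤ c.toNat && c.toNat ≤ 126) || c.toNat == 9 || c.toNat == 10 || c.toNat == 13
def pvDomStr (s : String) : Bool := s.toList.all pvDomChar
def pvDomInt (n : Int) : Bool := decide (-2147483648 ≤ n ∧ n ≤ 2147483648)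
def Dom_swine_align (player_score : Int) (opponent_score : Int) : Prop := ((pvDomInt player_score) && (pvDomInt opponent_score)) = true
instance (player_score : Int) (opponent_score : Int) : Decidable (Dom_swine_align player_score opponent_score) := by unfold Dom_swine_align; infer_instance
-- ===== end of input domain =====

-- B replaces A's iterative gcd (swap + while-loop) with a recursive Euclidean helper; guard and >= 10 check unchanged.

-- ===== PORT A =====
-- termination helper for both gcd recursions: Python's % shrinks |divisor|
theorem pv_mod_natAbs_lt (b r : Int) (h : r ≠ 0) : (PySem.Int.mod b r).natAbs < r.natAbs := by
  rcases lt_or_gt_of_ne h with hneg | hpos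
  · have := PySem.Int.mod_neg_bounds b hneg; omega
  · have h1 := PySem.Int.mod_nonneg b hpos
    have h2 := PySem.Int.mod_lt b hpos
    omega

-- the while-loop of A's gcd_inner: state (b, r); while r != 0: b, r = r, b % r
def pvLoopA (b r : Int) : Int :=
  if h : r = 0 then b else pvLoopA r (PySem.Int.mod b r)
termination_by r.natAbs
decreasing_by exact pv_mod_natAbs_lt b r h

-- A's gcd_inner: swap so a >= b, compute first remainder, then the while-loop
def pvGcdInnerA (a b : Int) : Int :=
  let p := if a < b then (b, a) else (a, b)
  pvLoopA p.2 (PySem.Int.mod p.1 p.2)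

def swine_align (player_score : Int) (opponent_score : Int) : Bool :=
  if player_score ≤ 0 || opponent_score ≤ 0 then false
  else decide (10 ≤ pvGcdInnerA player_score opponent_score)

-- ===== PORT B =====
-- B's recursive gcd_inner: a if b == 0 else gcd_inner(b, a % b)
def pvGcdB (a b : Int) : Int :=
  if h : b = 0 then a else pvGcdB b (PySem.Int.mod a b)
termination_by b.natAbs
decreasing_by exact pv_mod_natAbs_lt a b h

def swine_align_alt (player_score : Int) (opponent_score : Int) : Bool :=
  if player_score ≤ 0 || opponent_score ≤ 0 then false
  else decide (10 ≤ pvGcdB player_score opponent_score)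

-- ===== PRECONDITION & SPEC =====
def Spec_swine_align (player_score : Int) (opponent_score : Int) (out : Bool) : Prop := out = swine_align_alt player_score opponent_score
instance (player_score : Int) (opponent_score : Int) (out : Bool) : Decidable (Spec_swine_align player_score opponent_score out) := by unfold Spec_swine_align; infer_instance

-- ===== CLAIM (what is proved, stated in full; the proofs are below) =====
def Claim_equal_swine_align : Prop := ∀ (player_score : Int) (opponent_score : Int), Dom_swine_align player_score opponent_score → Spec_swine_align player_score opponent_score (swine_align player_score opponent_score)

-- ===== LEMMAS AND PROOFS =====

theorem pvGcdB_step (a b : Int) (h : b ≠ 0) :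
    pvGcdB a b = pvGcdB b (PySem.Int.mod a b) := by
  rw [pvGcdB, dif_neg h]

theorem pvLoopA_eq_pvGcdB (b r : Int) : pvLoopA b r = pvGcdB b r := by
  induction b, r using pvLoopA.induct
  case _ b => rw [pvLoopA, pvGcdB]; simp
  case _ b r h ih => rw [pvLoopA, dif_neg h, pvGcdB_step _ _ h, ih]

theorem pv_mod_small (a b : Int) (ha : 0 ≤ a) (hab : a < b) : PySem.Int.mod a b = a := by
  rw [PySem.Int.mod_eq_emod_of_pos (by omega)]
  exact Int.emod_eq_of_lt ha hab

theorem pvGcdInnerA_eq (a b : Int) (ha : 0 < a) (hb : 0 < b) :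
    pvGcdInnerA a b = pvGcdB a b := by
  unfold pvGcdInnerA
  by_cases hlt : a < b
  · simp only [hlt, if_true]
    rw [pvLoopA_eq_pvGcdB,
      pvGcdB_step a b (by omega), pv_mod_small a b (by omega) hlt,
      pvGcdB_step b a (by omega)]
  · simp only [hlt, if_false]
    rw [pvLoopA_eq_pvGcdB, pvGcdB_step a b (by omega)]

-- ===== VERDICT (by name: the statement is the Claim_ definition above) =====
theorem swine_align_spec : Claim_equal_swine_align := by
  intro p o _
  unfold Spec_swine_align swine_align swine_align_alt
  by_cases h : (p ≤ 0 || o ≤ 0) = true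
  · simp [h]
  · simp only [Bool.or_eq_true, decide_eq_true_eq, not_or, not_le] at h
    simp only [Bool.or_eq_true, decide_eq_true_eq,
      if_neg (by omega : ¬ (p ≤ 0 ∨ o ≤ 0))]
    rw [pvGcdInnerA_eq p o h.1 h.2]
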